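-- pv_equiv track=rewrite | github.com/Bismarrck/tensoralloy | behler.py | get_elements_from_kbody_term
-- ===== SOURCE A (Python) =====
-- from typing import List, Union, Dict
--
-- def get_elements_from_kbody_term(kbody_term: str) -> List[str]:
--     """
--     Return the atoms in the given k-body term.
--
--     Parameters
--     ----------
--     kbody_term : str
--         A str as the k-body term.
--
--     Returns
--     -------
--     elements : List
--         A list of str as the elements of the k-body term.
--
--     """
--     sel = [0]
--     for i in range(len(kbody_term)):
--         if kbody_term[i].isupper():
--             sel.append(i + 1)
--         else:
--             sel[-1] += 1
--     atoms = []
--     for i in range(len(sel) - 1):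
--         atoms.append(kbody_term[sel[i]: sel[i + 1]])
--     return atoms
-- ===== SOURCE B (Python) =====
-- from typing import List
--
-- def get_elements_from_kbody_term(kbody_term: str) -> List[str]:
--     atoms = []
--     for ch in kbody_term:
--         if ch.isupper():
--             atoms.append(ch)
--         elif atoms:
--             atoms[-1] += ch
--     return atoms
-- ===== Notes on version B (the rewrite author's own statement) =====
-- stated objective: simpler
-- what changed: Single pass that grows the element substrings directly (append a new one-char atom on an uppercase char, extend the last atom otherwise) instead of building an offset list and then slicing between consecutive offsets in a second pass.
import Mathlib
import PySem

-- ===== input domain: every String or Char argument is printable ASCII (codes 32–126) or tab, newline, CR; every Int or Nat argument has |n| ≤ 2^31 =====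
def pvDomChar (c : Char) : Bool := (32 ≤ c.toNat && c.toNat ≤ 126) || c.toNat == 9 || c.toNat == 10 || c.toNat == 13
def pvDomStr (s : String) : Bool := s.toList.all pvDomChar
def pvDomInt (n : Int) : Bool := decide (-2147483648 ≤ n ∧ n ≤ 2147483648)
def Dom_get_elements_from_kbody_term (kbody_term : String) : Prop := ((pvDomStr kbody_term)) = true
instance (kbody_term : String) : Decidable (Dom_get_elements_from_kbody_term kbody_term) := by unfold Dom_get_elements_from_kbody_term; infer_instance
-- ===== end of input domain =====

-- B replaces A's offset-list-then-slice two-pass structure by one pass that grows the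
-- element substrings directly (objective: simpler; same asymptotic cost).

-- ===== PORT A =====
-- Two passes, exactly as A: first build the offset list `sel` (append i+1 on an
-- uppercase char, else bump sel[-1]), then slice between consecutive offsets.
def get_elements_from_kbody_term (kbody_term : String) : List String :=
  let cs := kbody_term.toList
  let sel : List Int :=
    (PySem.List.pyRange 0 (cs.length : Int) 1).foldl
      (fun sel i =>
        if PySem.Chars.isupper (PySem.List.pyGetD cs i ' ')
        then sel ++ [i + 1]
        else sel.dropLast ++ [PySem.List.pyGetD sel (-1) 0 + 1]) [0]
  let atoms : List (List Char) :=
    (PySem.List.pyRange 0 ((sel.length : Int) - 1) 1).foldl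
      (fun atoms i =>
        atoms ++ [PySem.List.slice cs (some (PySem.List.pyGetD sel i 0))
                                      (some (PySem.List.pyGetD sel (i + 1) 0))]) []
  atoms.map String.mk

-- ===== PORT B =====
-- One pass over the characters: append a fresh one-char atom on an uppercase char,
-- otherwise extend the last atom (ignore the char if there is no atom yet).
-- B's Python strings are represented as List Char and packed with String.mk at the end.
def get_elements_from_kbody_term_alt (kbody_term : String) : List String :=
  (kbody_term.toList.foldl
    (fun atoms ch =>
      if PySem.Chars.isupper ch then atoms ++ [[ch]]
      else if atoms.isEmpty then atoms
      else atoms.dropLast ++ [atoms.getLast?.getD [] ++ [ch]])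
    ([] : List (List Char))).map String.mk

-- ===== PRECONDITION & SPEC =====
def Spec_get_elements_from_kbody_term (kbody_term : String) (out : List String) : Prop := out = get_elements_from_kbody_term_alt kbody_term
instance (kbody_term : String) (out : List String) : Decidable (Spec_get_elements_from_kbody_term kbody_term out) := by unfold Spec_get_elements_from_kbody_term; infer_instance

-- ===== CLAIM (what is proved, stated in full; the proofs are below) =====
def Claim_equal_get_elements_from_kbody_term : Prop := ∀ (kbody_term : String), Dom_get_elements_from_kbody_term kbody_term → Spec_get_elements_from_kbody_term kbody_term (get_elements_from_kbody_term kbody_term)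

-- ===== LEMMAS AND PROOFS =====

-- slices of `cs` between consecutive offsets (proof-side reference for A's second pass)
def pvPairSlices (cs : List Char) : List Int → List (List Char)
  | a :: b :: r => PySem.List.slice cs (some a) (some b) :: pvPairSlices cs (b :: r)
  | _ => []

-- A's first-pass step / B's step, named for the proofs
def pvStepA (cs : List Char) (sel : List Int) (i : Int) : List Int :=
  if PySem.Chars.isupper (PySem.List.pyGetD cs i ' ')
  then sel ++ [i + 1]
  else sel.dropLast ++ [PySem.List.pyGetD sel (-1) 0 + 1]

def pvStepB (atoms : List (List Char)) (ch : Char) : List (List Char) :=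
  if PySem.Chars.isupper ch then atoms ++ [[ch]]
  else if atoms.isEmpty then atoms
  else atoms.dropLast ++ [atoms.getLast?.getD [] ++ [ch]]

theorem pvPairSlices_append_last (cs : List Char) (sel : List Int) (h : sel ≠ []) (b : Int) :
    pvPairSlices cs (sel ++ [b]) =
      pvPairSlices cs sel ++ [PySem.List.slice cs (some (sel.getLast h)) (some b)] := by
  induction sel with
  | nil => exact absurd rfl h
  | cons a r ih =>
    cases r with
    | nil => simp [pvPairSlices]
    | cons c r' =>
      simp only [List.cons_append, pvPairSlices]
      rw [← List.cons_append, ih (by simp)]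
      simp [List.getLast]

-- extend a slice by one character on the right
theorem pvSlice_extend (cs : List Char) (p : Int) (k : Nat)
    (hp0 : 0 ≤ p) (hpk : p ≤ (k : Int)) (hk : k < cs.length) :
    PySem.List.slice cs (some p) (some ((k : Int) + 1)) =
      PySem.List.slice cs (some p) (some (k : Int)) ++ [cs[k]] := by
  rw [PySem.List.slice_toNat cs hp0 (by positivity),
      PySem.List.slice_toNat cs hp0 (by exact_mod_cast Nat.zero_le k)]
  have hpt : p.toNat ≤ k := by omega
  have h1 : ((k : Int) + 1).toNat = k + 1 := by omega
  have h2 : ((k : Int)).toNat = k := by omega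
  rw [h1, h2]
  have hsub : k + 1 - p.toNat = (k - p.toNat) + 1 := by omega
  rw [hsub, List.take_succ]
  congr 1
  have hlt : k - p.toNat < (cs.drop p.toNat).length := by
    simp [List.length_drop]; omega
  rw [List.getElem?_eq_getElem hlt]
  simp [List.getElem_drop]
  congr 1
  omega

-- the main simulation: A's offset fold tracked against B's atom fold
theorem pvLoop_sim (cs : List Char) :
    ∀ (m k : Nat) (sel : List Int) (atoms : List (List Char)) (hne : sel ≠ []),
      cs.length = k + m →
      sel.getLast hne = (k : Int) →
      (∀ x ∈ sel, 0 ≤ x ∧ x ≤ (k : Int)) →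
      pvPairSlices cs sel = atoms →
      pvPairSlices cs (((List.range' k m).map (fun (j : Nat) => (j : Int))).foldl (pvStepA cs) sel)
        = (cs.drop k).foldl pvStepB atoms := by
  intro m
  induction m with
  | zero =>
    intro k sel atoms hne hlen _ _ hps
    simp [List.range']
    rw [List.drop_of_length_le (by omega)]
    simpa using hps
  | succ m ih =>
    intro k sel atoms hne hlen hlast hbnd hps
    have hk : k < cs.length := by omega
    rw [List.range'_succ, List.map_cons, List.foldl_cons]
    have hdrop : cs.drop k = cs[k] :: cs.drop (k + 1) :=
      List.drop_eq_getElem_cons hk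
    rw [hdrop, List.foldl_cons]
    have hget : PySem.List.pyGetD cs (k : Int) ' ' = cs[k] := by
      rw [PySem.List.pyGetD_natCast]
      exact List.getD_eq_getElem cs ' ' hk
    by_cases hup : PySem.Chars.isupper cs[k]
    · -- uppercase: new offset / new atom
      have hA : pvStepA cs sel (k : Int) = sel ++ [(k : Int) + 1] := by
        simp [pvStepA, hget, hup]
      have hB : pvStepB atoms cs[k] = atoms ++ [[cs[k]]] := by
        simp [pvStepB, hup]
      rw [hA, hB]
      apply ih (k + 1) (sel ++ [(k : Int) + 1]) (atoms ++ [[cs[k]]]) (by simp)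
      · omega
      · simp
      · intro x hx
        rcases List.mem_append.mp hx with h | h
        · have := hbnd x h; push_cast; omega
        · simp at h; subst h; push_cast; omega
      · rw [pvPairSlices_append_last cs sel hne, hlast, hps]
        congr 2
        rw [pvSlice_extend cs (k : Int) k (by positivity) le_rfl hk]
        have : PySem.List.slice cs (some (k : Int)) (some (k : Int)) = [] := by
          rw [PySem.List.slice_toNat cs (by positivity) (by positivity)]
          simp
        rw [this]; simp
    · -- not uppercase: bump last offset / extend last atom (or skip)
      have hA : pvStepA cs sel (k : Int) = sel.dropLast ++ [(k : Int) + 1] := by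
        simp [pvStepA, hget, hup, PySem.List.pyGetD_neg_one sel 0 hne, hlast]
      have hB' := hup
      cases hsel : sel.dropLast with
      | nil =>
        -- sel is a singleton [k]; no atoms yet, char ignored
        have hsing : sel = [(k : Int)] := by
          have := List.dropLast_append_getLast hne
          rw [hsel, hlast] at this; simpa using this.symm
        have hatoms : atoms = [] := by rw [← hps, hsing]; rfl
        have hB : pvStepB atoms cs[k] = atoms := by
          simp [pvStepB, hup, hatoms]
        rw [hA, hB, hsel]
        apply ih (k + 1) [(k : Int) + 1] atoms (by simp)
        · omega
        · simp
        · intro x hx; simp at hx; subst hx; push_cast; omega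
        · rw [← hps, hsing]; rfl
      | cons a r =>
        -- sel has ≥ 2 entries; last atom gets extended
        have hdl_ne : sel.dropLast ≠ [] := by rw [hsel]; simp
        have hsel_eq : sel = sel.dropLast ++ [(k : Int)] := by
          have := List.dropLast_append_getLast hne
          rw [hlast] at this; exact this.symm
        set p := sel.dropLast.getLast hdl_ne with hp
        have hp_mem : p ∈ sel := by
          rw [hsel_eq]; exact List.mem_append_left _ (List.getLast_mem hdl_ne)
        have hp0 : 0 ≤ p := (hbnd p hp_mem).1
        have hpk : p ≤ (k : Int) := (hbnd p hp_mem).2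
        have hdl2 : sel.dropLast = sel.dropLast.dropLast ++ [p] :=
          (List.dropLast_append_getLast hdl_ne).symm
        -- pvPairSlices of sel and of the bumped sel
        have hps_sel : pvPairSlices cs sel =
            pvPairSlices cs sel.dropLast ++ [PySem.List.slice cs (some p) (some (k : Int))] := by
          conv_lhs => rw [hsel_eq]
          rw [pvPairSlices_append_last cs sel.dropLast hdl_ne]
        have hps_sel' : pvPairSlices cs (sel.dropLast ++ [(k : Int) + 1]) =
            pvPairSlices cs sel.dropLast ++ [PySem.List.slice cs (some p) (some ((k : Int) + 1))] := by
          rw [pvPairSlices_append_last cs sel.dropLast hdl_ne]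
        have hatoms_ne : atoms ≠ [] := by
          rw [← hps, hps_sel]; simp
        have hB : pvStepB atoms cs[k] =
            atoms.dropLast ++ [atoms.getLast?.getD [] ++ [cs[k]]] := by
          simp [pvStepB, hup, List.isEmpty_iff, hatoms_ne]
        have hatoms_split : atoms = pvPairSlices cs sel.dropLast ++
            [PySem.List.slice cs (some p) (some (k : Int))] := by rw [← hps, hps_sel]
        rw [hA, hB]
        apply ih (k + 1) (sel.dropLast ++ [(k : Int) + 1]) _ (by simp)
        · omega
        · simp
        · intro x hx
          rcases List.mem_append.mp hx with h | h
          · have := hbnd x (by rw [hsel_eq]; exact List.mem_append_left _ h)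
            push_cast; omega
          · simp at h; subst h; push_cast; omega
        · rw [hps_sel', hatoms_split]
          rw [pvSlice_extend cs p k hp0 hpk hk]
          simp

-- A's second pass computes pvPairSlices of the offset list
theorem pvAdjMap (cs : List Char) (sel : List Int) :
    (List.range (sel.length - 1)).map
      (fun (i : Nat) => PySem.List.slice cs (some (sel.getD i 0)) (some (sel.getD (i + 1) 0)))
      = pvPairSlices cs sel := by
  induction sel with
  | nil => simp [pvPairSlices]
  | cons a r ih =>
    cases r with
    | nil => simp [pvPairSlices]
    | cons b r' =>
      have h1 : (a :: b :: r').length - 1 = r'.length + 1 := by simp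
      rw [h1, List.range_succ_eq_map, List.map_cons, List.map_map]
      simp only [pvPairSlices]
      congr 1

theorem pvSecond_pass (cs : List Char) (sel : List Int) (hbnd : ∀ x ∈ sel, 0 ≤ x) :
    (PySem.List.pyRange 0 ((sel.length : Int) - 1) 1).foldl
      (fun atoms i =>
        atoms ++ [PySem.List.slice cs (some (PySem.List.pyGetD sel i 0))
                                      (some (PySem.List.pyGetD sel (i + 1) 0))]) []
      = pvPairSlices cs sel := by
  rw [PySem.List.foldl_append_singleton_eq_map]
  simp only [List.nil_append]
  cases sel with
  | nil => simp [pvPairSlices, PySem.List.pyRange]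
  | cons a r =>
    have hlen : (((a :: r).length : Int)) - 1 = ((r.length : Nat) : Int) := by simp
    rw [hlen, PySem.List.pyRange_zero_natCast, List.map_map]
    rw [← pvAdjMap cs (a :: r)]
    have h1 : (a :: r).length - 1 = r.length := by simp
    rw [h1]
    apply List.map_congr_left
    intro i _
    simp only [Function.comp]
    have hc : ((i : Int)) + 1 = ((i + 1 : Nat) : Int) := by push_cast; ring
    rw [hc, PySem.List.pyGetD_natCast, PySem.List.pyGetD_natCast]

-- ===== VERDICT (by name: the statement is the Claim_ definition above) =====
theorem get_elements_from_kbody_term_spec : Claim_equal_get_elements_from_kbody_term := by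
  intro kbody_term _
  unfold Spec_get_elements_from_kbody_term
  unfold get_elements_from_kbody_term get_elements_from_kbody_term_alt
  set cs := kbody_term.toList with hcs
  simp only []
  -- name A's folds
  have hrange : PySem.List.pyRange 0 (cs.length : Int) 1 =
      (List.range' 0 cs.length).map (fun (j : Nat) => (j : Int)) := by
    rw [PySem.List.pyRange_zero_natCast, List.range_eq_range']
  congr 1
  rw [hrange]
  -- first fold step functions coincide with pvStepA / pvStepB
  have hAfun : (fun (sel : List Int) (i : Int) =>
      if PySem.Chars.isupper (PySem.List.pyGetD cs i ' ')
      then sel ++ [i + 1]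
      else sel.dropLast ++ [PySem.List.pyGetD sel (-1) 0 + 1]) = pvStepA cs := rfl
  have hBfun : (fun (atoms : List (List Char)) (ch : Char) =>
      if PySem.Chars.isupper ch then atoms ++ [[ch]]
      else if atoms.isEmpty then atoms
      else atoms.dropLast ++ [atoms.getLast?.getD [] ++ [ch]]) = pvStepB := rfl
  rw [hAfun, hBfun]
  set selF := ((List.range' 0 cs.length).map (fun (j : Nat) => (j : Int))).foldl (pvStepA cs) [0]
    with hselF
  have hbnd0 : ∀ x ∈ ([0] : List Int), 0 ≤ x ∧ x ≤ ((0 : Nat) : Int) := by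
    intro x hx; simp at hx; simp [hx]
  have hsim := pvLoop_sim cs cs.length 0 [0] [] (by simp) (by omega) (by simp) hbnd0 rfl
  rw [← hselF] at hsim
  have hbndF : ∀ x ∈ selF, 0 ≤ x := by
    -- every state of A's fold keeps entries ≥ 0
    have : ∀ (l : List Int) (sel : List Int), (∀ x ∈ sel, 0 ≤ x) → (∀ x ∈ l, 0 ≤ x) →
        ∀ x ∈ l.foldl (pvStepA cs) sel, 0 ≤ x := by
      intro l
      induction l with
      | nil => intro sel hs _ x hx; exact hs x hx
      | cons i t iht =>
        intro sel hs hl x hx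
        rw [List.foldl_cons] at hx
        refine iht (pvStepA cs sel i) ?_ (fun y hy => hl y (List.mem_cons_of_mem i hy)) x hx
        intro y hy
        unfold pvStepA at hy
        split at hy
        · rcases List.mem_append.mp hy with h | h
          · exact hs y h
          · simp at h; subst h; have := hl i (List.mem_cons_self ..); omega
        · rcases List.mem_append.mp hy with h | h
          · exact hs y (List.dropLast_subset _ h)
          · simp at h; subst h
            by_cases hsel : sel = []
            · subst hsel; decide
            · rw [PySem.List.pyGetD_neg_one sel 0 hsel]
              have := hs _ (List.getLast_mem hsel)
              omega
    exact this _ [0] (by intro x hx; simp at hx; simp [hx]) (by intro x hx; simp at hx; obtain ⟨j, _, hj⟩ := hx; omega)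
  rw [pvSecond_pass cs selF hbndF, hsim]
  simp
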